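-- pv_equiv track=rewrite | github.com/pypi-data/pypi-mirror-404 | packages/fraiseql-confiture/fraiseql_confiture-0.3.12-cp313-cp313-manylinux_2_28_x86_64.whl/confiture/core/anonymization/strategies/credit_card.py | _apply_format
-- ===== SOURCE A (Python) =====
-- def _apply_format(original: str, cleaned: str) -> str:
--     """Apply original formatting to cleaned card number.
--
--     Args:
--         original: Original card number with formatting
--         cleaned: Cleaned anonymized card number
--
--     Returns:
--         Card number with original formatting applied
--     """
--     result = []
--     cleaned_idx = 0
--
--     for char in original:
--         if char.isdigit():
--             if cleaned_idx < len(cleaned):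
--                 result.append(cleaned[cleaned_idx])
--                 cleaned_idx += 1
--         else:
--             result.append(char)
--
--     return "".join(result)
-- ===== SOURCE B (Python) =====
-- def _apply_format(original: str, cleaned: str) -> str:
--     digit_positions = [i for i, c in enumerate(original) if c.isdigit()]
--     result = list(original)
--     for i, pos in enumerate(digit_positions):
--         result[pos] = cleaned[i] if i < len(cleaned) else ''
--     return ''.join(result)
-- ===== Notes on version B (the rewrite author's own statement) =====
-- stated objective: alternative
-- what changed: Replaces A's single interleaved pass with a moving cleaned-cursor by a two-pass index-then-fill decomposition: first collect the digit positions of `original`, then overwrite exactly those slots of list(original) from `cleaned` and join.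
import Mathlib
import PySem

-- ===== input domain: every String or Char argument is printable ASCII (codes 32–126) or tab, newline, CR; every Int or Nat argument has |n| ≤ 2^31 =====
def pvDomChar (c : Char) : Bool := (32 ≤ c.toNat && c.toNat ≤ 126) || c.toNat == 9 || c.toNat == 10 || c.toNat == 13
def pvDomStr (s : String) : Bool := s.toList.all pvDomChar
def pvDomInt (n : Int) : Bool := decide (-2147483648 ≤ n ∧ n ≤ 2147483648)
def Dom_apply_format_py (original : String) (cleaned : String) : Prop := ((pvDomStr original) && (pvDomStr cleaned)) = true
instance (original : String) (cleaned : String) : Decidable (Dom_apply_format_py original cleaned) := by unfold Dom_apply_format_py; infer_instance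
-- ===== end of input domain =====

-- B replaces A's single interleaved cursor pass by a two-pass index-then-fill decomposition
-- (collect digit positions, then overwrite those slots from `cleaned`); objective: alternative, same cost.

-- ===== PORT A =====
-- single pass over `original` with state (result, cleaned_idx); `cleaned[cleaned_idx]`
-- is guarded by `cleaned_idx < len(cleaned)`, so getD is exact here
def apply_format_py (original : String) (cleaned : String) : String :=
  let d := cleaned.toList
  let st := original.toList.foldl
    (fun (st : List Char × Nat) ch =>
      if PySem.Chars.isdigit ch then
        if st.2 < d.length then (st.1 ++ [d.getD st.2 ' '], st.2 + 1) else st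
      else (st.1 ++ [ch], st.2))
    ([], 0)
  String.ofList st.1

-- ===== PORT B =====
-- helper for `cleaned[i] if i < len(cleaned) else ''` (slots are strings of ≤ 1 char,
-- modelled as List Char); the index is guarded, so getD/toNat are exact
def pvFillChar (d : List Char) (i : Int) : List Char :=
  if i < (d.length : Int) then [d.getD i.toNat ' '] else []

-- index-then-fill: digit_positions in a first pass, result = list(original), fill loop, join
def apply_format_py_alt (original : String) (cleaned : String) : String :=
  let o := original.toList
  let d := cleaned.toList
  let digitPositions : List Int :=
    (PySem.List.enumerate o 0).filterMap
      (fun p => if PySem.Chars.isdigit p.2 then some p.1 else none)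
  let result0 : List (List Char) := o.map (fun c => [c])
  let result :=
    (PySem.List.enumerate digitPositions 0).foldl
      (fun res p => res.set p.2.toNat (pvFillChar d p.1)) result0
  String.ofList result.flatten

-- ===== PRECONDITION & SPEC =====
def Spec_apply_format_py (original : String) (cleaned : String) (out : String) : Prop := out = apply_format_py_alt original cleaned
instance (original : String) (cleaned : String) (out : String) : Decidable (Spec_apply_format_py original cleaned out) := by unfold Spec_apply_format_py; infer_instance

-- ===== CLAIM (what is proved, stated in full; the proofs are below) =====
def Claim_equal_apply_format_py : Prop := ∀ (original : String) (cleaned : String), Dom_apply_format_py original cleaned → Spec_apply_format_py original cleaned (apply_format_py original cleaned)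

-- ===== LEMMAS AND PROOFS =====

/-- Common functional specification of the result characters. -/
def pvSpecAF : List Char → List Char → List Char
  | [], _ => []
  | c :: t, d =>
    if PySem.Chars.isdigit c then
      match d with
      | [] => pvSpecAF t []
      | x :: ds => x :: pvSpecAF t ds
    else c :: pvSpecAF t d

/-- The slot list B builds, described structurally. -/
def pvFillSpec : List Char → List Char → List (List Char)
  | [], _ => []
  | c :: t, d =>
    if PySem.Chars.isdigit c then
      match d with
      | [] => [] :: pvFillSpec t []
      | x :: ds => [x] :: pvFillSpec t ds
    else [c] :: pvFillSpec t d

/-- Recursive view of A's digit-position list. -/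
def pvPosI : List Char → Int → List Int
  | [], _ => []
  | c :: t, s => if PySem.Chars.isdigit c then s :: pvPosI t (s + 1) else pvPosI t (s + 1)

theorem pvPosI_eq (o : List Char) (s : Int) :
    (PySem.List.enumerate o s).filterMap
      (fun p => if PySem.Chars.isdigit p.2 then some p.1 else none) = pvPosI o s := by
  induction o generalizing s with
  | nil => simp [PySem.List.enumerate_nil, pvPosI]
  | cons c t ih =>
    simp only [PySem.List.enumerate_cons, List.filterMap_cons, pvPosI]
    by_cases h : PySem.Chars.isdigit c <;> simp [h, ih]

theorem pvPosI_shift (o : List Char) (s : Int) :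
    pvPosI o (s + 1) = (pvPosI o s).map (· + 1) := by
  induction o generalizing s with
  | nil => simp [pvPosI]
  | cons c t ih =>
    by_cases h : PySem.Chars.isdigit c <;> simp [pvPosI, h, ih]

theorem pvPosI_nonneg (o : List Char) (s : Int) (hs : 0 ≤ s) :
    ∀ p ∈ pvPosI o s, 0 ≤ p := by
  induction o generalizing s with
  | nil => simp [pvPosI]
  | cons c t ih =>
    intro p hp
    by_cases h : PySem.Chars.isdigit c
    · simp [pvPosI, h] at hp
      rcases hp with rfl | hp
      · exact hs
      · exact ih (s + 1) (by omega) p hp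
    · simp [pvPosI, h] at hp
      exact ih (s + 1) (by omega) p hp

/-- Shifting all set-positions by one skips the head of the accumulator. -/
theorem pvFold_shift (ps : List Int) (k : Int) (a : List Char) (rest : List (List Char))
    (g : Int → List Char) (hps : ∀ p ∈ ps, 0 ≤ p) :
    (PySem.List.enumerate (ps.map (· + 1)) k).foldl
        (fun res p => res.set p.2.toNat (g p.1)) (a :: rest)
      = a :: (PySem.List.enumerate ps k).foldl
        (fun res p => res.set p.2.toNat (g p.1)) rest := by
  induction ps generalizing k a rest with
  | nil => simp [PySem.List.enumerate_nil]
  | cons p ps ih =>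
    have hp : 0 ≤ p := hps p (by simp)
    simp only [List.map_cons, PySem.List.enumerate_cons, List.foldl_cons]
    have hset : (a :: rest).set (p + 1).toNat (g k) = a :: rest.set p.toNat (g k) := by
      have : (p + 1).toNat = p.toNat + 1 := by omega
      simp [this]
    rw [hset, ih (k + 1) a _ (fun q hq => hps q (by simp [hq]))]

/-- Bumping the enumerate counter corresponds to dropping the head of `cleaned`. -/
theorem pvFold_drop (ps : List Int) (k : Nat) (init : List (List Char)) (d : List Char) :
    (PySem.List.enumerate ps ((k : Int) + 1)).foldl
        (fun res p => res.set p.2.toNat (pvFillChar d p.1)) init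
      = (PySem.List.enumerate ps (k : Int)).foldl
        (fun res p => res.set p.2.toNat (pvFillChar (d.drop 1) p.1)) init := by
  induction ps generalizing k init with
  | nil => simp [PySem.List.enumerate_nil]
  | cons p ps ih =>
    simp only [PySem.List.enumerate_cons, List.foldl_cons]
    have hval : pvFillChar d ((k : Int) + 1) = pvFillChar (d.drop 1) (k : Int) := by
      unfold pvFillChar
      rcases d with _ | ⟨x, ds⟩
      · have h1 : ¬ ((k : Int) + 1 < (0 : Int)) := by omega
        have h2 : ¬ ((k : Int) < (0 : Int)) := by omega
        simp [h1, h2]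
      · simp only [List.drop_one, List.tail_cons, List.length_cons]
        by_cases h : (k : Int) < (ds.length : Int)
        · have h1 : (k : Int) + 1 < ((ds.length : Nat) + 1 : Int) := by omega
          have h2 : ((k : Int) + 1).toNat = k + 1 := by omega
          simp [h, h1, h2, List.getD]
        · have h1 : ¬ ((k : Int) + 1 < ((ds.length : Nat) + 1 : Int)) := by omega
          simp [h, h1]
    rw [hval]
    have hk : ((k : Int) + 1) + 1 = ((k + 1 : Nat) : Int) + 1 := by push_cast; ring
    rw [hk, ih (k + 1)]
    norm_num

theorem pvFillMain (o d : List Char) :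
    (PySem.List.enumerate (pvPosI o 0) 0).foldl
        (fun res p => res.set p.2.toNat (pvFillChar d p.1)) (o.map (fun c => [c]))
      = pvFillSpec o d := by
  induction o generalizing d with
  | nil => simp [pvPosI, pvFillSpec, PySem.List.enumerate_nil]
  | cons c t ih =>
    have hsh : pvPosI t 1 = (pvPosI t 0).map (· + 1) := by
      simpa using pvPosI_shift t 0
    by_cases h : PySem.Chars.isdigit c
    · have hpos : pvPosI (c :: t) 0 = 0 :: (pvPosI t 0).map (· + 1) := by
        simp [pvPosI, h, hsh]
      rw [hpos]
      simp only [PySem.List.enumerate_cons, List.foldl_cons, List.map_cons]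
      have hset : (([c] : List Char) :: t.map (fun c => [c])).set (0 : Int).toNat
          (pvFillChar d 0) = pvFillChar d 0 :: t.map (fun c => [c]) := by simp
      rw [hset]
      have e1 : (0 : Int) + 1 = ((0 : Nat) : Int) + 1 := by norm_num
      rw [e1, pvFold_drop ((pvPosI t 0).map (· + 1)) 0
        (pvFillChar d 0 :: t.map (fun c => [c])) d]
      have e0 : ((0 : Nat) : Int) = (0 : Int) := by norm_num
      rw [e0, pvFold_shift (pvPosI t 0) 0 _ _ _ (pvPosI_nonneg t 0 le_rfl)]
      rw [ih (d.drop 1)]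
      rcases d with _ | ⟨x, ds⟩
      · simp [pvFillSpec, h, pvFillChar]
      · simp [pvFillSpec, h, pvFillChar]
    · have hpos : pvPosI (c :: t) 0 = (pvPosI t 0).map (· + 1) := by
        simp [pvPosI, h, hsh]
      rw [hpos]
      simp only [List.map_cons]
      rw [pvFold_shift (pvPosI t 0) 0 _ _ _ (pvPosI_nonneg t 0 le_rfl)]
      rw [ih d]
      simp [pvFillSpec, h]

theorem pvFlatten_fillSpec (o d : List Char) :
    (pvFillSpec o d).flatten = pvSpecAF o d := by
  induction o generalizing d with
  | nil => simp [pvFillSpec, pvSpecAF]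
  | cons c t ih =>
    by_cases h : PySem.Chars.isdigit c
    · rcases d with _ | ⟨x, ds⟩ <;> simp [pvFillSpec, pvSpecAF, h, ih]
    · simp [pvFillSpec, pvSpecAF, h, ih]

theorem pvA_foldl (o d : List Char) (acc : List Char) (idx : Nat) :
    (o.foldl
      (fun (st : List Char × Nat) ch =>
        if PySem.Chars.isdigit ch then
          if st.2 < d.length then (st.1 ++ [d.getD st.2 ' '], st.2 + 1) else st
        else (st.1 ++ [ch], st.2))
      (acc, idx)).1 = acc ++ pvSpecAF o (d.drop idx) := by
  induction o generalizing acc idx with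
  | nil => simp [pvSpecAF]
  | cons c t ih =>
    simp only [List.foldl_cons]
    by_cases h : PySem.Chars.isdigit c
    · by_cases hlt : idx < d.length
      · have hdrop : d.drop idx = d[idx] :: d.drop (idx + 1) :=
          (List.drop_eq_getElem_cons hlt).trans rfl
        simp only [h, if_pos, hlt, ih]
        rw [hdrop]
        simp [pvSpecAF, h, List.getD, List.getElem?_eq_getElem hlt]
      · have hdrop : d.drop idx = [] := List.drop_eq_nil_of_le (by omega)
        rw [if_pos h, if_neg hlt, ih, hdrop]
        simp [pvSpecAF, h]
    · simp only [h, ih]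
      simp [pvSpecAF, h]

-- ===== VERDICT (by name: the statement is the Claim_ definition above) =====
theorem apply_format_py_spec : Claim_equal_apply_format_py := by
  intro original cleaned _
  unfold Spec_apply_format_py apply_format_py apply_format_py_alt
  simp only [pvPosI_eq]
  rw [pvFillMain, pvFlatten_fillSpec, pvA_foldl]
  simp
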